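-- pv_equiv track=rewrite | github.com/sainttttt/karina | convert.py | short_mods
-- ===== SOURCE A (Python) =====
-- SORTED_MODS = [
--     'control',
--     'left_control',
--     'right_control',
--     'option',
--     'left_option',
--     'right_option',
--     'alt',
--     'left_alt',
--     'right_alt',
--     'shift',
--     'left_shift',
--     'right_shift',
--     'command',
--     'left_command',
--     'right_command',
-- ]
--
-- LONG_TO_SHORT_MOD = {
--     'control':       'T',
--     'left_control':  'T',
--     'right_control': 'W',
--     'option':        'O',
--     'left_option':   'O',
--     'right_option':  'E',
--     'alt':           'O',
--     'left_alt':      'O',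
--     'right_alt':     'E',
--     'shift':         'S',
--     'left_shift':    'S',
--     'right_shift':   'R',
--     'command':       'C',
--     'left_command':  'C',
--     'right_command': 'Q',
-- }
--
-- def short_mods(mods):
--     """Return canonically-in-order mods, converted to short form.
--
--     Args:
--         mods: "left_command", etc.
--     """
--     if 'any' in mods:
--         return '#'
--     key = {mod: index for index, mod in enumerate(SORTED_MODS)}
--     for mod in mods:
--         if mod not in SORTED_MODS:
--             raise ValueError(f'mod {mod} not found in SORTED_MODS')
--     return ''.join(LONG_TO_SHORT_MOD[m] for m in sorted(mods, key=lambda m: key[m]))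
-- ===== SOURCE B (Python) =====
-- # B: counting pass over a fixed (long, short) pair table, no dict and no sort.
-- SHORT_PAIRS = [
--     ('control',       'T'),
--     ('left_control',  'T'),
--     ('right_control', 'W'),
--     ('option',        'O'),
--     ('left_option',   'O'),
--     ('right_option',  'E'),
--     ('alt',           'O'),
--     ('left_alt',      'O'),
--     ('right_alt',     'E'),
--     ('shift',         'S'),
--     ('left_shift',    'S'),
--     ('right_shift',   'R'),
--     ('command',       'C'),
--     ('left_command',  'C'),
--     ('right_command', 'Q'),
-- ]
--
--
-- def short_mods(mods):
--     """Return canonically-in-order mods, converted to short form (counting pass)."""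
--     mods = list(mods)
--     if 'any' in mods:
--         return '#'
--     bad = [m for m in mods if all(long != m for long, _ in SHORT_PAIRS)]
--     if bad:
--         raise ValueError(f'mod {bad[0]} not found in SORTED_MODS')
--     out = []
--     for long, short in SHORT_PAIRS:
--         out.extend([short] * mods.count(long))
--     return ''.join(out)
-- ===== Notes on version B (the rewrite author's own statement) =====
-- stated objective: alternative
-- what changed: Replaces the index-keyed comparison sort and the lookup dicts with a counting pass over a fixed (long, short) pair table: each canonical entry emits its short letter repeated by the input's count of that mod.
import Mathlib
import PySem

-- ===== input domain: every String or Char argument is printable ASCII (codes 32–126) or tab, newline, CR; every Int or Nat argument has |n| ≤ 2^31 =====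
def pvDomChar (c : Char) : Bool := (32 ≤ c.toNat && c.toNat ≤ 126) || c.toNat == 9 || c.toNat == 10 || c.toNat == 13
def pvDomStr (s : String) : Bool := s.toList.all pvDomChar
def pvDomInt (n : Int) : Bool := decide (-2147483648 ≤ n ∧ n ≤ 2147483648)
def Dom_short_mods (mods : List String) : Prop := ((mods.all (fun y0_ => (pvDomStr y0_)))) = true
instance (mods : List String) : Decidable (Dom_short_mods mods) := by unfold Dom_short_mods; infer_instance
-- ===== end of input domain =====

-- B replaces A's index-keyed comparison sort and lookup dicts with a counting pass
-- over a fixed (long, short) pair table, emitting each short letter by count (alternative decomposition, same result).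


-- ===== PORT A =====
-- A's module constants
def pvSortedMods : List String :=
  ["control", "left_control", "right_control",
   "option", "left_option", "right_option",
   "alt", "left_alt", "right_alt",
   "shift", "left_shift", "right_shift",
   "command", "left_command", "right_command"]

def pvLongToShort : PySem.Dict String String :=
  PySem.Dict.ofList
    [("control", "T"), ("left_control", "T"), ("right_control", "W"),
     ("option", "O"), ("left_option", "O"), ("right_option", "E"),
     ("alt", "O"), ("left_alt", "O"), ("right_alt", "E"),
     ("shift", "S"), ("left_shift", "S"), ("right_shift", "R"),
     ("command", "C"), ("left_command", "C"), ("right_command", "Q")]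

-- literal port of A: 'any' check, dict comprehension over enumerate, validation loop (raise → "" outside Pre_),
-- then join of shorts over the stable sort keyed by canonical index
def short_mods (mods : List String) : String :=
  if "any" ∈ mods then "#"
  else
    let key : PySem.Dict String Int :=
      (PySem.List.enumerate pvSortedMods 0).foldl (fun d p => d.insert p.2 p.1) PySem.Dict.empty
    if mods.any (fun m => !(pvSortedMods.contains m)) then ""  -- raise ValueError (excluded by Pre_)
    else
      PySem.Str.join ""
        ((PySem.List.sorted mods (fun m => key.getD m 0) false).map (fun m => pvLongToShort.getD m ""))

-- ===== PORT B =====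
-- B's module constant: the canonical table of (long, short) pairs
def pvShortPairs : List (String × Char) :=
  [("control", 'T'), ("left_control", 'T'), ("right_control", 'W'),
   ("option", 'O'), ("left_option", 'O'), ("right_option", 'E'),
   ("alt", 'O'), ("left_alt", 'O'), ("right_alt", 'E'),
   ("shift", 'S'), ("left_shift", 'S'), ("right_shift", 'R'),
   ("command", 'C'), ("left_command", 'C'), ("right_command", 'Q')]

-- literal port of Source B: 'any' check, bad-list comprehension (raise → "" outside Pre_),
-- then a fold over the pair table extending the output by count copies of each short letter
-- ('[short] * mods.count(long)' ported as List.replicate over the count; exact since count ≥ 0)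
def short_mods_alt (mods : List String) : String :=
  if "any" ∈ mods then "#"
  else if (mods.filter (fun m => pvShortPairs.all (fun p => p.1 != m))) ≠ [] then ""
  else
    String.ofList
      (pvShortPairs.foldl (fun out p => out ++ List.replicate (mods.count p.1) p.2) [])

-- ===== PRECONDITION & SPEC =====
-- Pre_ excludes exactly the inputs on which A raises ValueError: some mod outside SORTED_MODS while 'any' is absent.
def Pre_short_mods (mods : List String) : Prop :=
  "any" ∈ mods ∨ ∀ m ∈ mods, m ∈ pvSortedMods
instance (mods : List String) : Decidable (Pre_short_mods mods) := by unfold Pre_short_mods; infer_instance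

def pvWitness_short_mods : List String := ["shift", "left_control", "shift", "command"]

def Spec_short_mods (mods : List String) (out : String) : Prop := out = short_mods_alt mods
instance (mods : List String) (out : String) : Decidable (Spec_short_mods mods out) := by unfold Spec_short_mods; infer_instance

-- ===== CLAIM (what is proved, stated in full; the proofs are below) =====
def Claim_equal_short_mods : Prop := ∀ (mods : List String), Dom_short_mods mods → Pre_short_mods mods → Spec_short_mods mods (short_mods mods)

-- ===== LEMMAS AND PROOFS =====

-- insertBy walks past a prefix it does not go before
theorem insertBy_append_of_not_before {α : Type} (bf : α → α → Bool) (x : α) (l1 l2 : List α)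
    (h1 : ∀ y ∈ l1, bf x y = false) :
    PySem.List.insertBy bf x (l1 ++ l2) = l1 ++ PySem.List.insertBy bf x l2 := by
  induction l1 with
  | nil => rfl
  | cons a t ih =>
    have ha : bf x a = false := h1 a (by simp)
    simp [PySem.List.insertBy, ha, ih (fun y hy => h1 y (by simp [hy]))]

-- insertBy stops at the first element it goes before
theorem insertBy_all_before {α : Type} (bf : α → α → Bool) (x : α) (l : List α)
    (h : ∀ y ∈ l, bf x y = true) :
    PySem.List.insertBy bf x l = x :: l := by
  cases l with
  | nil => rfl
  | cons a t => simp [PySem.List.insertBy, h a (by simp)]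

-- elements of the bucket concatenation are bucket labels
theorem mem_flatMap_filter {α : Type} [DecidableEq α] (bs p : List α) (y : α)
    (hy : y ∈ bs.flatMap (fun s => p.filter (fun m => m == s))) : y ∈ bs := by
  simp only [List.mem_flatMap, List.mem_filter] at hy
  obtain ⟨s, hs, _, he⟩ := hy
  exact (beq_iff_eq.mp he) ▸ hs

-- inserting one valid element into the bucket concatenation lands at the end of its bucket
theorem insertBy_buckets {α : Type} [DecidableEq α] (k : α → Int) (bs : List α)
    (hb : bs.Pairwise (fun a b => k a < k b)) (p : List α) (x : α) (hx : x ∈ bs) :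
    PySem.List.insertBy (fun a b => decide (k a < k b)) x (bs.flatMap (fun s => p.filter (fun m => m == s)))
      = bs.flatMap (fun s => (p ++ [x]).filter (fun m => m == s)) := by
  induction bs with
  | nil => simp at hx
  | cons b bs' ih =>
    have hpb : ∀ y ∈ p.filter (fun m => m == b), y = b := by
      intro y hy; exact beq_iff_eq.mp (List.mem_filter.mp hy).2
    rcases List.mem_cons.mp hx with hxb | hxm
    · subst hxb
      have h1 : ∀ y ∈ p.filter (fun m => m == x), (fun a b => decide (k a < k b)) x y = false := by
        intro y hy; simp [hpb y hy]
      have h2 : ∀ y ∈ bs'.flatMap (fun s => p.filter (fun m => m == s)),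
          (fun a b => decide (k a < k b)) x y = true := by
        intro y hy
        have hyb : y ∈ bs' := mem_flatMap_filter bs' p y hy
        have := (List.pairwise_cons.mp hb).1 y hyb
        simpa using this
      rw [List.flatMap_cons, insertBy_append_of_not_before _ _ _ _ h1,
          insertBy_all_before _ _ _ h2]
      simp only [List.flatMap_cons, List.filter_append]
      have hhead : List.filter (fun m => m == x) [x] = [x] := by simp
      have htail : ∀ s ∈ bs', List.filter (fun m => m == s) [x] = [] := by
        intro s hs
        have hk := (List.pairwise_cons.mp hb).1 s hs
        have hne : (x == s) = false := beq_eq_false_iff_ne.mpr (by rintro rfl; omega)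
        simp [List.filter, hne]
      have htails : bs'.flatMap (fun s => List.filter (fun m => m == s) p ++ List.filter (fun m => m == s) [x])
          = bs'.flatMap (fun s => List.filter (fun m => m == s) p) := by
        rw [List.flatMap_def, List.flatMap_def]
        exact congrArg List.flatten (List.map_congr_left (fun s hs => by rw [htail s hs, List.append_nil]))
      rw [hhead, htails]
      simp
    · have hkbx : k b < k x := (List.pairwise_cons.mp hb).1 x hxm
      have h1 : ∀ y ∈ p.filter (fun m => m == b), (fun a b => decide (k a < k b)) x y = false := by
        intro y hy; rw [hpb y hy]; simp; omega
      have hne : (x == b) = false := by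
        have : x ≠ b := by rintro rfl; omega
        simp [this]
      rw [List.flatMap_cons, insertBy_append_of_not_before _ _ _ _ h1,
          ih (List.pairwise_cons.mp hb).2 hxm, List.flatMap_cons]
      have hb0 : List.filter (fun m => m == b) [x] = [] := by simp [List.filter, hne]
      rw [List.filter_append, hb0, List.append_nil]

-- the stable sort of a list of bucket labels is the bucket concatenation
theorem sorted_eq_buckets {α : Type} [DecidableEq α] (k : α → Int) (bs : List α)
    (hb : bs.Pairwise (fun a b => k a < k b)) (mods : List α) (h : ∀ m ∈ mods, m ∈ bs) :
    PySem.List.sorted mods k false = bs.flatMap (fun s => mods.filter (fun m => m == s)) := by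
  rw [PySem.List.sorted_eq_foldl_insertBy]
  suffices H : ∀ (p rest : List α), (∀ m ∈ rest, m ∈ bs) →
      rest.foldl (fun acc x => PySem.List.insertBy (fun a b => decide (k a < k b)) x acc)
        (bs.flatMap (fun s => p.filter (fun m => m == s)))
      = bs.flatMap (fun s => (p ++ rest).filter (fun m => m == s)) by
    have := H [] mods h
    simpa [List.flatMap_def] using this
  intro p rest
  induction rest generalizing p with
  | nil => intro _; simp
  | cons x t ih =>
    intro hr
    rw [List.foldl_cons, insertBy_buckets k bs hb p x (hr x (by simp)),
        ih (p ++ [x]) (fun m hm => hr m (by simp [hm]))]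
    simp

theorem intercalate_nil_sep (L : List (List Char)) : [].intercalate L = L.flatten := by
  simp only [List.intercalate]
  induction L with
  | nil => rfl
  | cons a t ih =>
    cases t with
    | nil => simp
    | cons b t' =>
      rw [List.intersperse_cons₂, List.flatten_cons, List.flatten_cons, List.flatten_cons, ih,
          List.flatten_cons]
      simp

theorem join_empty_sep (L : List String) :
    (PySem.Str.join "" L).toList = (L.map String.toList).flatten := by
  rw [PySem.Str.toList_join]
  show PySem.Chars.join [] _ = _
  simp [PySem.Chars.join, intercalate_nil_sep]

theorem flatten_map_flatMap {α β γ : Type} (bs : List α) (g : α → List β) (f : β → List γ) :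
    ((bs.flatMap g).map f).flatten = (bs.map (fun s => ((g s).map f).flatten)).flatten := by
  induction bs with
  | nil => rfl
  | cons a t ih => simp [ih]

theorem flatten_replicate_singleton {α : Type} (n : Nat) (c : α) :
    (List.replicate n [c]).flatten = List.replicate n c := by
  induction n with
  | zero => rfl
  | succ k ih => simp [List.replicate_succ, ih]

-- B's loop: folding 'out ++ g p' over a list concatenates the blocks
theorem foldl_append_blocks {α β : Type} (L : List α) (g : α → List β) (acc : List β) :
    L.foldl (fun out p => out ++ g p) acc = acc ++ (L.map g).flatten := by
  induction L generalizing acc with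
  | nil => simp
  | cons a t ih => simp [ih]

-- A's key dict is strictly increasing along SORTED_MODS
theorem pvKey_pairwise :
    pvSortedMods.Pairwise (fun a b =>
      ((PySem.List.enumerate pvSortedMods 0).foldl (fun d p => d.insert p.2 p.1) PySem.Dict.empty).getD a 0
        < ((PySem.List.enumerate pvSortedMods 0).foldl (fun d p => d.insert p.2 p.1) PySem.Dict.empty).getD b 0) := by
  decide

-- the two tables agree: SORTED_MODS is the first column of the pair table,
-- and the short string for each entry is the singleton of its pair's char
theorem pvTables_agree :
    pvSortedMods.map (fun s => ((pvLongToShort.getD s "").toList, s))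
      = pvShortPairs.map (fun p => ([p.2], p.1)) := by
  decide

theorem pvValid_iff : ∀ m ∈ pvSortedMods, (pvShortPairs.all (fun p => p.1 != m)) = false := by
  decide

-- ===== VERDICT (by name: the statement is the Claim_ definition above) =====
theorem short_mods_spec : Claim_equal_short_mods := by
  intro mods _ hpre
  unfold Spec_short_mods short_mods short_mods_alt
  by_cases hany : "any" ∈ mods
  · simp [hany]
  · simp only [hany, ite_false]
    have hval : ∀ m ∈ mods, m ∈ pvSortedMods := by
      unfold Pre_short_mods at hpre
      rcases hpre with h | h
      · exact absurd h hany
      · exact h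
    have hA : (mods.any (fun m => !(pvSortedMods.contains m))) = false := by
      rw [List.any_eq_false]
      intro m hm
      simp [hval m hm]
    have hB : (mods.filter (fun m => pvShortPairs.all (fun p => p.1 != m))) = [] := by
      rw [List.filter_eq_nil_iff]
      intro m hm
      simp [pvValid_iff m (hval m hm)]
    simp only [hA, hB, Bool.false_eq_true, ite_false, ne_eq, not_true_eq_false]
    apply String.toList_inj.mp
    rw [join_empty_sep, String.toList_ofList, foldl_append_blocks, List.nil_append,
        sorted_eq_buckets _ pvSortedMods pvKey_pairwise mods hval,
        List.map_map, flatten_map_flatMap]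
    have hmaps : ∀ s, ((mods.filter (fun m => m == s)).map (fun m => (pvLongToShort.getD m "").toList)).flatten
        = (List.replicate (mods.count s) ((pvLongToShort.getD s "").toList)).flatten := by
      intro s
      rw [List.filter_beq, List.map_replicate]
    calc (pvSortedMods.map (fun s => ((mods.filter (fun m => m == s)).map
              (String.toList ∘ fun m => pvLongToShort.getD m "")).flatten)).flatten
        = (pvSortedMods.map (fun s => (List.replicate (mods.count s) ((pvLongToShort.getD s "").toList)).flatten)).flatten := by
          apply congrArg List.flatten
          apply List.map_congr_left
          intro s _
          simpa [Function.comp] using hmaps s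
      _ = (pvShortPairs.map (fun p => List.replicate (mods.count p.1) p.2)).flatten := by
          apply congrArg List.flatten
          have h2 := congrArg (List.map (fun q : List Char × String => (List.replicate (mods.count q.2) q.1).flatten)) pvTables_agree
          simpa [Function.comp_def, flatten_replicate_singleton] using h2
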